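-- pv_equiv track=rewrite | github.com/databendlabs/wizard | checksb/checksb.py | _group_queries_by_prefix
-- ===== SOURCE A (Python) =====
-- from typing import Dict, List, Tuple, Optional, Any
--
-- def _group_queries_by_prefix(queries: List[str]) -> Dict[str, List[Tuple[int, str]]]:
--     """Group queries by their SQL command prefix"""
--     groups = {}
--
--     for i, query in enumerate(queries, 1):
--         words = query.split()
--         if len(words) == 0:
--             prefix = "UNKNOWN"
--         elif words[0].upper() == "CREATE" and len(words) >= 4:
--             # For CREATE statements, use first 4 words: "CREATE OR REPLACE TABLE/STREAM/STAGE"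
--             prefix = ' '.join(words[:4]).upper()
--         else:
--             # For other statements, first word is enough
--             prefix = words[0].upper()
--
--         if prefix not in groups:
--             groups[prefix] = []
--         groups[prefix].append((i, query))
--
--     return groups
-- ===== SOURCE B (Python) =====
-- def _group_queries_by_prefix(queries):
--     """Group queries by SQL command prefix: two-pass — compute all prefixes,
--     dedup them in first-occurrence order, then collect each group by a filter."""
--     def prefix_of(query):
--         words = query.split()
--         if len(words) == 0:
--             return "UNKNOWN"
--         if words[0].upper() == "CREATE" and len(words) >= 4:
--             return ' '.join(words[:4]).upper()
--         return words[0].upper()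
--
--     items = [(prefix_of(q), i, q) for i, q in enumerate(queries, 1)]
--     order = list(dict.fromkeys(p for p, _, _ in items))
--     return {p: [(i, q) for pp, i, q in items if pp == p] for p in order}
-- ===== Notes on version B (the rewrite author's own statement) =====
-- stated objective: alternative
-- what changed: Replaces the streaming dict accumulation (membership check + in-place append per query) with a two-pass scheme: compute every query's prefix once, dedup the prefixes in first-occurrence order, then build each group by filtering the precomputed (prefix, index, query) triples.
import Mathlib
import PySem

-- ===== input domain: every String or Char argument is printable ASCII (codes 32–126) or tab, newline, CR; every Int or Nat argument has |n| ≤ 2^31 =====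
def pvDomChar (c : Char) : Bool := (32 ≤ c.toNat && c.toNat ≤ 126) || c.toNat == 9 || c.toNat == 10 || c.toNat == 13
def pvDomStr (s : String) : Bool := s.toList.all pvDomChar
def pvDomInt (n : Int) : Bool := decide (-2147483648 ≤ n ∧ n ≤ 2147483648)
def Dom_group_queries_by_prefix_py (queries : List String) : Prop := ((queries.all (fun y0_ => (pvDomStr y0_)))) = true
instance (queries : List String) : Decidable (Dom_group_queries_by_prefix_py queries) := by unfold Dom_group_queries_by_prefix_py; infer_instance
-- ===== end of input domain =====

-- B: same prefix logic, but two-pass — dedup the prefixes in first-occurrence order,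
-- then collect each group by filtering; instead of A's streaming dict accumulation.

-- shared prefix logic (identical branch code in both Pythons)
def pvPrefix (query : String) : String :=
  let words := PySem.Str.split₀ query
  match words with
  | [] => "UNKNOWN"
  | w0 :: _ =>
    if PySem.Str.upper w0 = "CREATE" ∧ 4 ≤ words.length then
      PySem.Str.upper (PySem.Str.join " " (PySem.List.slice words none (some 4)))
    else
      PySem.Str.upper w0

-- ===== PORT A =====
def group_queries_by_prefix_py (queries : List String) : List (String × List (Int × String)) :=
  ((PySem.List.enumerate queries 1).foldl
    (fun groups p =>
      let pfx := pvPrefix p.2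
      let groups1 := if groups.contains pfx then groups else groups.insert pfx []
      groups1.modify pfx [] (fun l => l ++ [p]))
    PySem.Dict.empty).items

-- ===== PORT B =====
def group_queries_by_prefix_py_alt (queries : List String) : List (String × List (Int × String)) :=
  let items := (PySem.List.enumerate queries 1).map (fun p => (pvPrefix p.2, p))
  let order := PySem.List.dedup (items.map (fun t => t.1))
  order.map (fun k => (k, (items.filter (fun t => t.1 == k)).map (fun t => t.2)))

-- ===== PRECONDITION & SPEC =====
def Spec_group_queries_by_prefix_py (queries : List String) (out : List (String × List (Int × String))) : Prop := out = group_queries_by_prefix_py_alt queries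
instance (queries : List String) (out : List (String × List (Int × String))) : Decidable (Spec_group_queries_by_prefix_py queries out) := by unfold Spec_group_queries_by_prefix_py; infer_instance

-- ===== CLAIM (what is proved, stated in full; the proofs are below) =====
def Claim_equal_group_queries_by_prefix_py : Prop := ∀ (queries : List String), Dom_group_queries_by_prefix_py queries → Spec_group_queries_by_prefix_py queries (group_queries_by_prefix_py queries)

-- ===== LEMMAS AND PROOFS =====

-- ===== VERDICT (by name: the statement is the Claim_ definition above) =====
-- A's loop step is exactly Dict.modify (the setdefault-style insert of [] is absorbed)
theorem pvStepA_eq (g : PySem.Dict String (List (Int × String))) (p : Int × String) :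
    (let pfx := pvPrefix p.2
     let groups1 := if g.contains pfx then g else g.insert pfx []
     groups1.modify pfx [] (fun l => l ++ [p]))
    = g.modify (pvPrefix p.2) [] (fun l => l ++ [p]) := by
  by_cases h : g.contains (pvPrefix p.2)
  · simp [h]
  · simp only [Bool.not_eq_true] at h
    simp only [h, if_neg Bool.false_ne_true, PySem.Dict.modify,
      PySem.Dict.getD_insert_self, PySem.Dict.insert_insert_self,
      PySem.Dict.getD_of_not_contains g [] h]

theorem group_queries_by_prefix_py_spec : Claim_equal_group_queries_by_prefix_py := by
  intro queries _
  unfold Spec_group_queries_by_prefix_py group_queries_by_prefix_py group_queries_by_prefix_py_alt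
  set l := PySem.List.enumerate queries 1 with hl
  have hbody :
      (fun (groups : PySem.Dict String (List (Int × String))) (p : Int × String) =>
        let pfx := pvPrefix p.2
        let groups1 := if groups.contains pfx then groups else groups.insert pfx []
        groups1.modify pfx [] (fun l => l ++ [p]))
      = fun groups p => groups.modify (pvPrefix p.2) [] (fun l => l ++ [p]) :=
    funext fun g => funext fun p => pvStepA_eq g p
  rw [hbody]
  set d := l.foldl (fun groups p => groups.modify (pvPrefix p.2) [] (fun l => l ++ [p]))
      PySem.Dict.empty with hd
  have hnodup : d.keys.Nodup := by
    rw [hd]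
    exact PySem.Dict.nodup_keys_foldl_modify_key l (fun p => pvPrefix p.2) []
      (fun _ p v => v ++ [p]) PySem.Dict.empty PySem.Dict.nodup_keys_empty
  have hkeys : d.keys = PySem.List.dedup (l.map (fun p => pvPrefix p.2)) := by
    rw [hd, PySem.Dict.keys_foldl_modify_key l (fun p => pvPrefix p.2) []
      (fun _ p v => v ++ [p]) PySem.Dict.empty, PySem.Dict.keys_empty]
    rfl
  have hgetD : ∀ k, d.getD k [] =
      ((l.map (fun p => (pvPrefix p.2, p))).filter (fun t => t.1 == k)).map (fun t => t.2) := by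
    intro k
    rw [hd]
    have := PySem.Dict.getD_foldl_modify_append (l.map (fun p => (pvPrefix p.2, p)))
      (PySem.Dict.empty (κ := String) (ν := List (Int × String))) k
    rw [List.foldl_map] at this
    simpa [PySem.Dict.getD_empty] using this
  rw [PySem.Dict.items_eq_map_keys d hnodup [], hkeys]
  have hfst : (l.map (fun p => (pvPrefix p.2, p))).map (fun t => t.1)
      = l.map (fun p => pvPrefix p.2) := by
    simp
  simp only [hfst]
  exact List.map_congr_left fun k _ => by rw [hgetD k]
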